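-- pv_equiv track=rewrite | github.com/Laughingtt/python-journey | leetcode/888公平的糖果交换.py | func
-- ===== SOURCE A (Python) =====
-- import copy
--
-- def func(A, B):
--     """
--     超出时间限制
--     """
--     for a in range(len(A)):
--         for b in range(len(B)):
--             new_a = copy.deepcopy(A)
--             new_b = copy.deepcopy(B)
--             new_a[a] = B[b]
--             new_b[b] = A[a]
--             if sum(new_a) == sum(new_b):
--                 return [A[a], B[b]]
-- ===== SOURCE B (Python) =====
-- def func(A, B):
--     # O(n+m): swap (x, y) equalizes sums iff y - x == (sum(B) - sum(A)) / 2.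
--     d = sum(B) - sum(A)
--     if d % 2 != 0:
--         return None
--     t = d // 2
--     bs = set(B)
--     for x in A:
--         if x + t in bs:
--             return [x, x + t]
--     return None
-- ===== Notes on version B (the rewrite author's own statement) =====
-- stated objective: faster
-- what changed: Replaced the brute-force double loop that rebuilds and re-sums both lists for every (a,b) pair with the closed-form condition y - x = (sum(B)-sum(A))/2 checked against a hash set of B in one pass over A.
import Mathlib
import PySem

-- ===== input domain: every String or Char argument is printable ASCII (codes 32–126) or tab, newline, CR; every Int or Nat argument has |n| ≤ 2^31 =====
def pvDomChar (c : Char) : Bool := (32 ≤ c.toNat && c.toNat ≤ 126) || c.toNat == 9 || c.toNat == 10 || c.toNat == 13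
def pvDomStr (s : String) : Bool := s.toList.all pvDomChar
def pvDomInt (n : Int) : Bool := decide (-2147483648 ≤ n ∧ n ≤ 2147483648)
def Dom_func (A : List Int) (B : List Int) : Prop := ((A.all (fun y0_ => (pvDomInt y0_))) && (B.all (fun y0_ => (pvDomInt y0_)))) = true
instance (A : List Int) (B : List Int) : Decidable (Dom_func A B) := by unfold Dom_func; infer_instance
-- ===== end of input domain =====

-- B replaces A's brute-force double loop (rebuild & re-sum both lists per pair) by the
-- closed-form condition y - x = (sum(B)-sum(A))/2 checked against a hash set of B; objective: faster.

-- ===== PORT A =====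
-- inner 'for b in range(len(B))' loop with its early return; indices come from range(len(·)), so
-- the total pySetD/pyGetD forms are exact here (always in range).
def funcInner (A : List Int) (B : List Int) (a : Int) : List Int → Option (List Int)
  | [] => none
  | b :: bs =>
    let new_a := PySem.List.pySetD A a (PySem.List.pyGetD B b 0)
    let new_b := PySem.List.pySetD B b (PySem.List.pyGetD A a 0)
    if new_a.sum = new_b.sum then
      some [PySem.List.pyGetD A a 0, PySem.List.pyGetD B b 0]
    else funcInner A B a bs

-- outer 'for a in range(len(A))' loop; implicit 'return None' at the end
def funcOuter (A : List Int) (B : List Int) : List Int → Option (List Int)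
  | [] => none
  | a :: rest =>
    match funcInner A B a (PySem.List.pyRange 0 (PySem.List.len B) 1) with
    | some r => some r
    | none => funcOuter A B rest

def func (A : List Int) (B : List Int) : Option (List Int) :=
  funcOuter A B (PySem.List.pyRange 0 (PySem.List.len A) 1)

-- ===== PORT B =====
-- 'for x in A: if x + t in bs: return [x, x + t]'
def funcAltScan (t : Int) (bs : PySem.Set Int) : List Int → Option (List Int)
  | [] => none
  | x :: xs => if PySem.Set.contains bs (x + t) then some [x, x + t] else funcAltScan t bs xs

def func_alt (A : List Int) (B : List Int) : Option (List Int) :=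
  let d := B.sum - A.sum
  if PySem.Int.mod d 2 ≠ 0 then none
  else funcAltScan (PySem.Int.floordiv d 2) (PySem.Set.ofList B) A

-- ===== PRECONDITION & SPEC =====
def Spec_func (A : List Int) (B : List Int) (out : Option (List Int)) : Prop := out = func_alt A B
instance (A : List Int) (B : List Int) (out : Option (List Int)) : Decidable (Spec_func A B out) := by unfold Spec_func; infer_instance

-- ===== CLAIM (what is proved, stated in full; the proofs are below) =====
def Claim_equal_func : Prop := ∀ (A : List Int) (B : List Int), Dom_func A B → Spec_func A B (func A B)

-- ===== LEMMAS AND PROOFS =====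

theorem sum_set_eq (xs : List Int) (n : Nat) (h : n < xs.length) (v : Int) :
    (xs.set n v).sum = xs.sum - xs[n] + v := by
  have h1 : (List.take n xs).sum + (List.drop n xs).sum = xs.sum := List.sum_take_add_sum_drop xs n
  rw [List.drop_eq_getElem_cons h, List.sum_cons] at h1
  rw [List.sum_set, if_pos h]
  omega

-- the swap-test of A, in closed form
theorem cond_iff (A B : List Int) (a b : Int)
    (ha : 0 ≤ a ∧ a < PySem.List.len A) (hb : 0 ≤ b ∧ b < PySem.List.len B) :
    ((PySem.List.pySetD A a (PySem.List.pyGetD B b 0)).sum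
      = (PySem.List.pySetD B b (PySem.List.pyGetD A a 0)).sum)
    ↔ (PySem.Int.mod (B.sum - A.sum) 2 = 0 ∧
       PySem.List.pyGetD B b 0 = PySem.List.pyGetD A a 0
         + PySem.Int.floordiv (B.sum - A.sum) 2) := by
  simp only [PySem.List.len_eq] at ha hb
  have haA : a.toNat < A.length := by omega
  have hbB : b.toNat < B.length := by omega
  rw [PySem.List.pyGetD_eq_getElem A 0 ha.1 (by omega),
      PySem.List.pyGetD_eq_getElem B 0 hb.1 (by omega),
      PySem.List.pySetD_of_nonneg A _ ha.1, PySem.List.pySetD_of_nonneg B _ hb.1,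
      sum_set_eq A a.toNat haA, sum_set_eq B b.toNat hbB]
  set d := B.sum - A.sum with hd
  have hdm := PySem.Int.floordiv_mul_add_mod d 2
  have hr0 := PySem.Int.mod_nonneg d (b := 2) (by omega)
  have hr1 := PySem.Int.mod_lt d (b := 2) (by omega)
  omega

theorem inner_none (A B : List Int) (a : Int) (ha : 0 ≤ a ∧ a < PySem.List.len A)
    (hodd : PySem.Int.mod (B.sum - A.sum) 2 ≠ 0) (L : List Int)
    (hL : ∀ b ∈ L, 0 ≤ b ∧ b < PySem.List.len B) :
    funcInner A B a L = none := by
  induction L with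
  | nil => rfl
  | cons b bs ih =>
    have hb := hL b (by simp)
    rw [funcInner, if_neg, ih (fun x hx => hL x (by simp [hx]))]
    rw [cond_iff A B a b ha hb]
    exact fun h => hodd h.1

theorem inner_even (A B : List Int) (a : Int) (ha : 0 ≤ a ∧ a < PySem.List.len A)
    (heven : PySem.Int.mod (B.sum - A.sum) 2 = 0) (L : List Int)
    (hL : ∀ b ∈ L, 0 ≤ b ∧ b < PySem.List.len B) :
    funcInner A B a L =
      (if (PySem.List.pyGetD A a 0 + PySem.Int.floordiv (B.sum - A.sum) 2)
            ∈ L.map (fun b => PySem.List.pyGetD B b 0)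
       then some [PySem.List.pyGetD A a 0,
                  PySem.List.pyGetD A a 0 + PySem.Int.floordiv (B.sum - A.sum) 2]
       else none) := by
  induction L with
  | nil => rfl
  | cons b bs ih =>
    have hb := hL b (by simp)
    rw [funcInner]
    by_cases hc : PySem.List.pyGetD B b 0
        = PySem.List.pyGetD A a 0 + PySem.Int.floordiv (B.sum - A.sum) 2
    · rw [if_pos ((cond_iff A B a b ha hb).2 ⟨heven, hc⟩)]
      simp [hc]
    · rw [if_neg (fun h => hc ((cond_iff A B a b ha hb).1 h).2),
          ih (fun x hx => hL x (by simp [hx]))]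
      simp only [List.map_cons, List.mem_cons]
      congr 1
      simp only [eq_iff_iff]
      constructor
      · exact fun h => Or.inr h
      · rintro (h | h)
        · exact absurd h.symm hc
        · exact h

theorem set_contains_iff (B : List Int) (v : Int) :
    PySem.Set.contains (PySem.Set.ofList B) v = true ↔ v ∈ B := by
  rw [PySem.Set.contains_iff, PySem.Set.mem_ofList]

theorem outer_none (A B : List Int)
    (hodd : PySem.Int.mod (B.sum - A.sum) 2 ≠ 0) (L : List Int)
    (hL : ∀ a ∈ L, 0 ≤ a ∧ a < PySem.List.len A) :
    funcOuter A B L = none := by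
  induction L with
  | nil => rfl
  | cons a rest ih =>
    rw [funcOuter,
        inner_none A B a (hL a (by simp)) hodd _
          (fun b hb => (PySem.List.mem_pyRange_one).1 hb),
        ih (fun x hx => hL x (by simp [hx]))]

theorem outer_even (A B : List Int)
    (heven : PySem.Int.mod (B.sum - A.sum) 2 = 0) (L : List Int)
    (hL : ∀ a ∈ L, 0 ≤ a ∧ a < PySem.List.len A) :
    funcOuter A B L =
      funcAltScan (PySem.Int.floordiv (B.sum - A.sum) 2) (PySem.Set.ofList B)
        (L.map (fun a => PySem.List.pyGetD A a 0)) := by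
  induction L with
  | nil => rfl
  | cons a rest ih =>
    have ha := hL a (by simp)
    rw [funcOuter,
        inner_even A B a ha heven _ (fun b hb => (PySem.List.mem_pyRange_one).1 hb)]
    have hmap : (PySem.List.pyRange 0 (PySem.List.len B) 1).map
        (fun b => PySem.List.pyGetD B b 0) = B := PySem.List.map_pyGetD_pyRange_zero B 0
    rw [hmap, List.map_cons, funcAltScan]
    set x := PySem.List.pyGetD A a 0
    set t := PySem.Int.floordiv (B.sum - A.sum) 2
    by_cases hm : (x + t) ∈ B
    · rw [if_pos hm, if_pos ((set_contains_iff B (x + t)).2 hm)]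
    · rw [if_neg hm, if_neg (by
        intro h; exact hm ((set_contains_iff B (x + t)).1 h)),
        ih (fun y hy => hL y (by simp [hy]))]

-- ===== VERDICT (by name: the statement is the Claim_ definition above) =====
theorem func_spec : Claim_equal_func := by
  intro A B _
  unfold Spec_func func func_alt
  by_cases heven : PySem.Int.mod (B.sum - A.sum) 2 = 0
  · rw [outer_even A B heven _ (fun a ha => (PySem.List.mem_pyRange_one).1 ha),
        PySem.List.map_pyGetD_pyRange_zero A 0, if_neg (not_not_intro heven)]
  · rw [outer_none A B heven _ (fun a ha => (PySem.List.mem_pyRange_one).1 ha),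
        if_pos heven]
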